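-- pv_equiv track=rewrite | github.com/databrickslabs/sandbox | lakemeter/backend/app/routes/line_items.py | _normalize_case
-- ===== SOURCE A (Python) =====
-- _UPPERCASE_FIELDS = {'cloud', 'dbsql_warehouse_type', 'dlt_edition', 'workload_type'}
--
-- _LOWERCASE_FIELDS = {
--     'serverless_mode', 'vector_search_mode', 'fmapi_provider',
--     'fmapi_rate_type', 'fmapi_endpoint_type', 'fmapi_context_length',
--     'model_serving_gpu_type', 'driver_pricing_tier', 'worker_pricing_tier',
--     'dbsql_vm_pricing_tier',
-- }
--
-- def _normalize_case(data: dict) -> dict: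
--     """Normalize enum-like string fields to canonical case."""
--     for field in _UPPERCASE_FIELDS:
--         if field in data and isinstance(data[field], str):
--             data[field] = data[field].upper()
--     for field in _LOWERCASE_FIELDS:
--         if field in data and isinstance(data[field], str):
--             data[field] = data[field].lower()
--     return data
-- ===== SOURCE B (Python) =====
-- _UPPERCASE_FIELDS = {'cloud', 'dbsql_warehouse_type', 'dlt_edition', 'workload_type'}
--
-- _LOWERCASE_FIELDS = {
--     'serverless_mode', 'vector_search_mode', 'fmapi_provider',
--     'fmapi_rate_type', 'fmapi_endpoint_type', 'fmapi_context_length',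
--     'model_serving_gpu_type', 'driver_pricing_tier', 'worker_pricing_tier',
--     'dbsql_vm_pricing_tier',
-- }
--
-- _TRANSFORM = {**{f: str.upper for f in _UPPERCASE_FIELDS},
--               **{f: str.lower for f in _LOWERCASE_FIELDS}}
--
--
-- def _normalize_case(data: dict) -> dict:
--     """Normalize enum-like string fields to canonical case."""
--     for key, value in data.items():
--         fn = _TRANSFORM.get(key)
--         if fn is not None and isinstance(value, str):
--             data[key] = fn(value)
--     return data
-- ===== Notes on version B (the rewrite author's own statement) =====
-- stated objective: idiomatic
-- what changed: B builds one field->transform dict once and makes a single pass over the data's own entries, instead of A's two loops over the constant field-name sets each probing the dict.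
import Mathlib
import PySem

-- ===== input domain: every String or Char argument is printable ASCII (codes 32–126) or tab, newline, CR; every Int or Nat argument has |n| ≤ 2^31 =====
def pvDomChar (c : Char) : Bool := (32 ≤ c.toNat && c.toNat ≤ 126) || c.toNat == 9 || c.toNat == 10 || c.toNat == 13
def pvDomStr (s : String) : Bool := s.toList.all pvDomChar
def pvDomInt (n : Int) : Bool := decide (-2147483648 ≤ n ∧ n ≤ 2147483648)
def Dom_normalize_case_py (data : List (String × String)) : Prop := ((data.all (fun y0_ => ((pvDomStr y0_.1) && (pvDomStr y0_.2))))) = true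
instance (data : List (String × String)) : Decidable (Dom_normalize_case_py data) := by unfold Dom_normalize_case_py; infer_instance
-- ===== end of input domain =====

-- B replaces A's two loops over the constant field-name sets by one pass over the
-- data's own entries consulting a single field→transform table (idiomatic; both
-- mutate the dict in place in Python — the equivalence proved is about the value).

-- ===== PORT A =====
def pvUpperFields : List String :=
  ["cloud", "dbsql_warehouse_type", "dlt_edition", "workload_type"]

def pvLowerFields : List String :=
  ["serverless_mode", "vector_search_mode", "fmapi_provider",
   "fmapi_rate_type", "fmapi_endpoint_type", "fmapi_context_length",
   "model_serving_gpu_type", "driver_pricing_tier", "worker_pricing_tier",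
   "dbsql_vm_pricing_tier"]

-- data[field] = g(data[field]) on an assoc list: overwrite the first entry with that key in place
def pvSetFirst (d : List (String × String)) (f : String) (g : String → String) : List (String × String) :=
  match d with
  | [] => []
  | p :: rest => if p.1 == f then (p.1, g p.2) :: rest else p :: pvSetFirst rest f g

-- 'for field in FIELDS: if field in data …: data[field] = g(data[field])'
-- (values are String by the type convention, so 'isinstance(value, str)' is always true)
def normalize_case_py (data : List (String × String)) : List (String × String) :=
  let d1 := pvUpperFields.foldl
    (fun d f => if d.any (fun p => p.1 == f) then pvSetFirst d f PySem.Str.upper else d) data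
  pvLowerFields.foldl
    (fun d f => if d.any (fun p => p.1 == f) then pvSetFirst d f PySem.Str.lower else d) d1

-- ===== PORT B =====
-- _TRANSFORM = {f: str.upper for f in _UPPERCASE_FIELDS} merged with {f: str.lower for f in _LOWERCASE_FIELDS}
def pvTransform : PySem.Dict String (String → String) :=
  PySem.Dict.ofList
    ((pvUpperFields.map (fun f => (f, PySem.Str.upper))) ++
     (pvLowerFields.map (fun f => (f, PySem.Str.lower))))

-- one pass over data.items(), rewriting each value through the table when its key is listed
def normalize_case_py_alt (data : List (String × String)) : List (String × String) :=
  data.map (fun p =>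
    match pvTransform.get? p.1 with
    | some fn => (p.1, fn p.2)
    | none => p)

-- ===== PRECONDITION & SPEC =====
-- Pre_ excludes lists with duplicate keys: they do not represent a Python dict
-- (A's and B's inputs are dicts, whose keys are unique by construction).
def Pre_normalize_case_py (data : List (String × String)) : Prop :=
  (data.map Prod.fst).Nodup

instance (data : List (String × String)) : Decidable (Pre_normalize_case_py data) := by
  unfold Pre_normalize_case_py; infer_instance

def pvWitness_normalize_case_py : (List (String × String)) :=
  [("cloud", "aws"), ("serverless_mode", "ON"), ("other", "Keep")]

def Spec_normalize_case_py (data : List (String × String)) (out : List (String × String)) : Prop := out = normalize_case_py_alt data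
instance (data : List (String × String)) (out : List (String × String)) : Decidable (Spec_normalize_case_py data out) := by unfold Spec_normalize_case_py; infer_instance

-- ===== CLAIM (what is proved, stated in full; the proofs are below) =====
def Claim_equal_normalize_case_py : Prop := ∀ (data : List (String × String)), Dom_normalize_case_py data → Pre_normalize_case_py data → Spec_normalize_case_py data (normalize_case_py data)

-- ===== LEMMAS AND PROOFS =====

-- per-field rewrite as a pure per-entry function
def pvStep (f : String) (g : String → String) (p : String × String) : String × String :=
  if p.1 == f then (p.1, g p.2) else p

lemma pvSetFirst_of_absent (d : List (String × String)) (f : String) (g : String → String)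
    (h : ∀ p ∈ d, p.1 ≠ f) : pvSetFirst d f g = d := by
  induction d with
  | nil => rfl
  | cons p rest ih =>
      have hp : p.1 ≠ f := h p (List.mem_cons_self)
      simp [pvSetFirst, beq_iff_eq, hp,
        ih (fun q hq => h q (List.mem_cons_of_mem _ hq))]

lemma pvStep_of_absent (f : String) (g : String → String) (d : List (String × String))
    (h : ∀ p ∈ d, p.1 ≠ f) : d.map (pvStep f g) = d := by
  induction d with
  | nil => rfl
  | cons p rest ih =>
      have hp : p.1 ≠ f := h p (List.mem_cons_self)
      simp [pvStep, beq_iff_eq, hp,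
        ih (fun q hq => h q (List.mem_cons_of_mem _ hq))]

lemma pvSetFirst_eq_map (d : List (String × String)) (f : String) (g : String → String)
    (hd : (d.map Prod.fst).Nodup) : pvSetFirst d f g = d.map (pvStep f g) := by
  induction d with
  | nil => rfl
  | cons p rest ih =>
      rw [List.map_cons] at hd
      obtain ⟨h1, h2⟩ := List.nodup_cons.mp hd
      by_cases hpf : p.1 = f
      · have habs : ∀ q ∈ rest, q.1 ≠ f := by
          intro q hq he
          exact h1 (by rw [hpf, ← he]; exact List.mem_map_of_mem hq)
        simp [pvSetFirst, pvStep, hpf, pvStep_of_absent f g rest habs]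
      · simp [pvSetFirst, pvStep, beq_iff_eq, hpf, ih h2]

lemma pvGuard_eq (d : List (String × String)) (f : String) (g : String → String) :
    (if d.any (fun p => p.1 == f) then pvSetFirst d f g else d) = pvSetFirst d f g := by
  cases h : d.any (fun p => p.1 == f) with
  | true => simp
  | false =>
      have habs : ∀ p ∈ d, p.1 ≠ f := by
        intro p hp
        have := List.any_eq_false.mp h p hp
        simpa [beq_iff_eq] using this
      simp [pvSetFirst_of_absent d f g habs]

lemma pvStep_fst (f : String) (g : String → String) (p : String × String) :
    (pvStep f g p).1 = p.1 := by
  unfold pvStep; split <;> rfl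

lemma pvKeys_map_step (f : String) (g : String → String) (d : List (String × String)) :
    (d.map (pvStep f g)).map Prod.fst = d.map Prod.fst := by
  rw [List.map_map]
  exact List.map_congr_left (fun p _ => pvStep_fst f g p)

lemma pvFoldl_fields (fields : List String) (g : String → String) :
    ∀ (d : List (String × String)), fields.Nodup → (d.map Prod.fst).Nodup →
    fields.foldl (fun d f => if d.any (fun p => p.1 == f) then pvSetFirst d f g else d) d
      = d.map (fun p => if p.1 ∈ fields then (p.1, g p.2) else p) := by
  induction fields with
  | nil => intro d _ _; simp
  | cons f rest ih =>
      intro d hfields hd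
      obtain ⟨hf, hrest⟩ := List.nodup_cons.mp hfields
      rw [List.foldl_cons, pvGuard_eq, pvSetFirst_eq_map d f g hd,
          ih (d.map (pvStep f g)) hrest (by rw [pvKeys_map_step]; exact hd),
          List.map_map]
      refine List.map_congr_left (fun p _ => ?_)
      simp only [Function.comp, pvStep]
      by_cases hpf : p.1 = f
      · simp [hpf, hf]
      · simp [beq_iff_eq, hpf]

lemma pvTransform_mk : pvTransform = PySem.Dict.mk
    ((pvUpperFields.map (fun f => (f, PySem.Str.upper))) ++
     (pvLowerFields.map (fun f => (f, PySem.Str.lower)))) := rfl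

lemma pvGet_upper {k : String} (h : k ∈ pvUpperFields) :
    pvTransform.get? k = some PySem.Str.upper := by
  fin_cases h <;> rfl

lemma pvGet_lower {k : String} (h : k ∈ pvLowerFields) :
    pvTransform.get? k = some PySem.Str.lower := by
  fin_cases h <;> rfl

lemma pvGet_none {k : String} (h1 : k ∉ pvUpperFields) (h2 : k ∉ pvLowerFields) :
    pvTransform.get? k = none := by
  simp only [pvUpperFields, List.mem_cons, List.not_mem_nil, not_or] at h1
  simp only [pvLowerFields, List.mem_cons, List.not_mem_nil, not_or] at h2
  obtain ⟨u1, u2, u3, u4, -⟩ := h1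
  obtain ⟨l1, l2, l3, l4, l5, l6, l7, l8, l9, l10, -⟩ := h2
  rw [pvTransform_mk]
  simp [pvUpperFields, pvLowerFields, PySem.Dict.get?, beq_iff_eq,
    Ne.symm u1, Ne.symm u2, Ne.symm u3, Ne.symm u4,
    Ne.symm l1, Ne.symm l2, Ne.symm l3, Ne.symm l4, Ne.symm l5,
    Ne.symm l6, Ne.symm l7, Ne.symm l8, Ne.symm l9, Ne.symm l10]

lemma pvDisjoint {k : String} (h1 : k ∈ pvUpperFields) (h2 : k ∈ pvLowerFields) : False := by
  fin_cases h1 <;> simp [pvLowerFields] at h2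

theorem normalize_case_py_spec : Claim_equal_normalize_case_py := by
  intro data _ hpre
  unfold Spec_normalize_case_py normalize_case_py normalize_case_py_alt
  have hkeys : ((data.map (fun p => if p.1 ∈ pvUpperFields then (p.1, PySem.Str.upper p.2) else p)).map Prod.fst)
      = data.map Prod.fst := by
    rw [List.map_map]
    exact List.map_congr_left (fun p _ => by simp only [Function.comp]; split <;> rfl)
  rw [pvFoldl_fields pvUpperFields PySem.Str.upper data (by decide) hpre,
      pvFoldl_fields pvLowerFields PySem.Str.lower _ (by decide) (by rw [hkeys]; exact hpre),
      List.map_map]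
  refine (List.map_congr_left (fun p _ => ?_)).symm
  simp only [Function.comp]
  by_cases h1 : p.1 ∈ pvUpperFields
  · have h2 : p.1 ∉ pvLowerFields := fun h2 => pvDisjoint h1 h2
    simp [pvGet_upper h1, h1, h2]
  · by_cases h2 : p.1 ∈ pvLowerFields
    · simp [pvGet_lower h2, h1, h2]
    · simp [pvGet_none h1 h2, h1, h2]
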